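-- pv_equiv track=rewrite | github.com/s9034541160-source/Bldr | ARCHIVE_AUTO_CLEANUP_20250922_155822/analyze_duplicates.py | categorize_duplicates
-- ===== SOURCE A (Python) =====
-- def categorize_duplicates(duplicates):
--     """
--     Categorize duplicates by pattern to help with cleanup.
--
--     Args:
--         duplicates (dict): Dictionary mapping function names to lists of files
--
--     Returns:
--         dict: Categorized duplicates
--     """
--     categories = {
--         'archive_duplicates': {},  # Duplicates involving archive files
--         'plugin_duplicates': {},   # Duplicates in plugin system
--         'agent_duplicates': {},    # Duplicates in agent system
--         'tool_duplicates': {},     # Duplicates in tools system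
--         'trainer_duplicates': {},  # Duplicates in trainer scripts
--         'integration_duplicates': {}, # Duplicates in integration files
--         'core_duplicates': {},     # Duplicates in core modules
--         'other_duplicates': {}     # Everything else
--     }
--
--     for func_name, files in duplicates.items():
--         # Check for archive duplicates
--         if any('archive' in f.lower() or 'backup' in f.lower() for f in files):
--             categories['archive_duplicates'][func_name] = files
--         # Check for plugin duplicates
--         elif any('plugin' in f.lower() for f in files):
--             categories['plugin_duplicates'][func_name] = files
--         # Check for agent duplicates
--         elif any('agent' in f.lower() for f in files):
--             categories['agent_duplicates'][func_name] = files
--         # Check for tool duplicates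
--         elif any('tool' in f.lower() for f in files):
--             categories['tool_duplicates'][func_name] = files
--         # Check for trainer duplicates
--         elif any('trainer' in f.lower() or 'train' in f.lower() for f in files):
--             categories['trainer_duplicates'][func_name] = files
--         # Check for integration duplicates
--         elif any('integration' in f.lower() or 'telegram' in f.lower() for f in files):
--             categories['integration_duplicates'][func_name] = files
--         # Check for core duplicates
--         elif any('core' in f.lower() for f in files):
--             categories['core_duplicates'][func_name] = files
--         # Everything else
--         else:
--             categories['other_duplicates'][func_name] = files
--
--     return categories
-- ===== SOURCE B (Python) =====
-- _KEYWORDS = [("archive", 0), ("backup", 0), ("plugin", 1), ("agent", 2),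
--              ("tool", 3), ("trainer", 4), ("train", 4),
--              ("integration", 5), ("telegram", 5), ("core", 6)]
--
-- _NAMES = ["archive_duplicates", "plugin_duplicates", "agent_duplicates",
--           "tool_duplicates", "trainer_duplicates", "integration_duplicates",
--           "core_duplicates", "other_duplicates"]
--
--
-- def _file_rank(f):
--     """Smallest category index any keyword of this file matches (7 = none)."""
--     low = f.lower()
--     return min((i for kw, i in _KEYWORDS if kw in low), default=7)
--
--
-- def categorize_duplicates(duplicates):
--     categories = {name: {} for name in _NAMES}
--     for func_name, files in duplicates.items():
--         rank = min((_file_rank(f) for f in files), default=7)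
--         categories[_NAMES[rank]][func_name] = files
--     return categories
-- ===== Notes on version B (the rewrite author's own statement) =====
-- stated objective: alternative
-- what changed: Replaces A's hardcoded eight-way if/elif ladder with a keyword table: each file gets the minimum category index of any matching keyword, and a function's bucket is the minimum rank over its files, looked up in a name list.
import Mathlib
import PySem

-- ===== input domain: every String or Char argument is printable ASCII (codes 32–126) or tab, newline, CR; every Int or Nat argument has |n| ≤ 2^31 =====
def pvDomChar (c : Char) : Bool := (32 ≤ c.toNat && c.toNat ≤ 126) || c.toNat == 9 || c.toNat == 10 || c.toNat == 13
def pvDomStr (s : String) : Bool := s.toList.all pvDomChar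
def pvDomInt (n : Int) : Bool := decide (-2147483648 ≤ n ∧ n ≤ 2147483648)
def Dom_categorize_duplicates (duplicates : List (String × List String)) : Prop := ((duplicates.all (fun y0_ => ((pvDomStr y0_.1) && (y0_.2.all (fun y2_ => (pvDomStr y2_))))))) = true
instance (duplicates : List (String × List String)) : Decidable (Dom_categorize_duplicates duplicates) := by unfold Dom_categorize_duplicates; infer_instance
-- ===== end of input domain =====

-- B replaces A's eight-way if/elif ladder by a per-file minimum-rank computation over a keyword table
-- (objective: alternative decomposition, same cost); return values agree on every input.

-- ===== PORT A =====
-- literal transliteration of A: a dict of eight empty dicts, then an if/elif chain of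
-- 'any(kw in f.lower() for f in files)' tests choosing the bucket for each function.
def categorize_duplicates (duplicates : List (String × List String)) : List (String × List (String × List String)) :=
  (duplicates.foldl
    (fun cats kv =>
      if kv.2.any (fun f => PySem.Str.isIn "archive" (PySem.Str.lower f) || PySem.Str.isIn "backup" (PySem.Str.lower f)) then
        cats.modify "archive_duplicates" PySem.Dict.empty (fun d => d.insert kv.1 kv.2)
      else if kv.2.any (fun f => PySem.Str.isIn "plugin" (PySem.Str.lower f)) then
        cats.modify "plugin_duplicates" PySem.Dict.empty (fun d => d.insert kv.1 kv.2)
      else if kv.2.any (fun f => PySem.Str.isIn "agent" (PySem.Str.lower f)) then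
        cats.modify "agent_duplicates" PySem.Dict.empty (fun d => d.insert kv.1 kv.2)
      else if kv.2.any (fun f => PySem.Str.isIn "tool" (PySem.Str.lower f)) then
        cats.modify "tool_duplicates" PySem.Dict.empty (fun d => d.insert kv.1 kv.2)
      else if kv.2.any (fun f => PySem.Str.isIn "trainer" (PySem.Str.lower f) || PySem.Str.isIn "train" (PySem.Str.lower f)) then
        cats.modify "trainer_duplicates" PySem.Dict.empty (fun d => d.insert kv.1 kv.2)
      else if kv.2.any (fun f => PySem.Str.isIn "integration" (PySem.Str.lower f) || PySem.Str.isIn "telegram" (PySem.Str.lower f)) then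
        cats.modify "integration_duplicates" PySem.Dict.empty (fun d => d.insert kv.1 kv.2)
      else if kv.2.any (fun f => PySem.Str.isIn "core" (PySem.Str.lower f)) then
        cats.modify "core_duplicates" PySem.Dict.empty (fun d => d.insert kv.1 kv.2)
      else
        cats.modify "other_duplicates" PySem.Dict.empty (fun d => d.insert kv.1 kv.2))
    ((PySem.Dict.ofList
      [("archive_duplicates", PySem.Dict.empty), ("plugin_duplicates", PySem.Dict.empty),
       ("agent_duplicates", PySem.Dict.empty), ("tool_duplicates", PySem.Dict.empty),
       ("trainer_duplicates", PySem.Dict.empty), ("integration_duplicates", PySem.Dict.empty),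
       ("core_duplicates", PySem.Dict.empty), ("other_duplicates", PySem.Dict.empty)]) :
      PySem.Dict String (PySem.Dict String (List String)))).items.map (fun kv => (kv.1, kv.2.items))

-- ===== PORT B =====
def pvKeywords : List (String × Nat) :=
  [("archive", 0), ("backup", 0), ("plugin", 1), ("agent", 2), ("tool", 3),
   ("trainer", 4), ("train", 4), ("integration", 5), ("telegram", 5), ("core", 6)]

def pvNames : List String :=
  ["archive_duplicates", "plugin_duplicates", "agent_duplicates", "tool_duplicates",
   "trainer_duplicates", "integration_duplicates", "core_duplicates", "other_duplicates"]

-- min((i for kw, i in _KEYWORDS if kw in low), default=7) as a running-min fold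
def file_rank (f : String) : Nat :=
  pvKeywords.foldl
    (fun acc kwi => if PySem.Str.isIn kwi.1 (PySem.Str.lower f) then min acc kwi.2 else acc) 7

def categorize_duplicates_alt (duplicates : List (String × List String)) : List (String × List (String × List String)) :=
  (duplicates.foldl
    (fun cats kv =>
      -- rank = min of per-file ranks, default 7; _NAMES[rank] is in-range (rank ≤ 7), so getD is exact
      cats.modify (pvNames.getD (kv.2.foldl (fun acc f => min acc (file_rank f)) 7) "")
        PySem.Dict.empty (fun d => d.insert kv.1 kv.2))
    ((PySem.Dict.ofList (pvNames.map (fun name => (name, PySem.Dict.empty)))) :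
      PySem.Dict String (PySem.Dict String (List String)))).items.map (fun kv => (kv.1, kv.2.items))

-- ===== PRECONDITION & SPEC =====
def Spec_categorize_duplicates (duplicates : List (String × List String)) (out : List (String × List (String × List String))) : Prop := out = categorize_duplicates_alt duplicates
instance (duplicates : List (String × List String)) (out : List (String × List (String × List String))) : Decidable (Spec_categorize_duplicates duplicates out) := by unfold Spec_categorize_duplicates; infer_instance

-- ===== CLAIM (what is proved, stated in full; the proofs are below) =====
def Claim_equal_categorize_duplicates : Prop := ∀ (duplicates : List (String × List String)), Dom_categorize_duplicates duplicates → Spec_categorize_duplicates duplicates (categorize_duplicates duplicates)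

-- ===== LEMMAS AND PROOFS =====

-- A's if/elif chain for a single FILE, as a category index
def pvChain (f : String) : Nat :=
  if PySem.Str.isIn "archive" (PySem.Str.lower f) || PySem.Str.isIn "backup" (PySem.Str.lower f) then 0
  else if PySem.Str.isIn "plugin" (PySem.Str.lower f) then 1
  else if PySem.Str.isIn "agent" (PySem.Str.lower f) then 2
  else if PySem.Str.isIn "tool" (PySem.Str.lower f) then 3
  else if PySem.Str.isIn "trainer" (PySem.Str.lower f) || PySem.Str.isIn "train" (PySem.Str.lower f) then 4
  else if PySem.Str.isIn "integration" (PySem.Str.lower f) || PySem.Str.isIn "telegram" (PySem.Str.lower f) then 5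
  else if PySem.Str.isIn "core" (PySem.Str.lower f) then 6
  else 7

-- A's if/elif chain for a list of files, as a category index
def pvIdx (files : List String) : Nat :=
  if files.any (fun f => PySem.Str.isIn "archive" (PySem.Str.lower f) || PySem.Str.isIn "backup" (PySem.Str.lower f)) then 0
  else if files.any (fun f => PySem.Str.isIn "plugin" (PySem.Str.lower f)) then 1
  else if files.any (fun f => PySem.Str.isIn "agent" (PySem.Str.lower f)) then 2
  else if files.any (fun f => PySem.Str.isIn "tool" (PySem.Str.lower f)) then 3
  else if files.any (fun f => PySem.Str.isIn "trainer" (PySem.Str.lower f) || PySem.Str.isIn "train" (PySem.Str.lower f)) then 4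
  else if files.any (fun f => PySem.Str.isIn "integration" (PySem.Str.lower f) || PySem.Str.isIn "telegram" (PySem.Str.lower f)) then 5
  else if files.any (fun f => PySem.Str.isIn "core" (PySem.Str.lower f)) then 6
  else 7

lemma file_rank_eq_chain (f : String) : file_rank f = pvChain f := by
  simp only [file_rank, pvChain, pvKeywords, List.foldl]
  generalize PySem.Str.isIn "archive" (PySem.Str.lower f) = x0
  generalize PySem.Str.isIn "backup" (PySem.Str.lower f) = x1
  generalize PySem.Str.isIn "plugin" (PySem.Str.lower f) = x2
  generalize PySem.Str.isIn "agent" (PySem.Str.lower f) = x3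
  generalize PySem.Str.isIn "tool" (PySem.Str.lower f) = x4
  generalize PySem.Str.isIn "trainer" (PySem.Str.lower f) = x5
  generalize PySem.Str.isIn "train" (PySem.Str.lower f) = x6
  generalize PySem.Str.isIn "integration" (PySem.Str.lower f) = x7
  generalize PySem.Str.isIn "telegram" (PySem.Str.lower f) = x8
  generalize PySem.Str.isIn "core" (PySem.Str.lower f) = x9
  revert x0 x1 x2 x3 x4 x5 x6 x7 x8 x9
  decide

lemma foldl_min_shift (g : String → Nat) (r : List String) (a b : Nat) :
    r.foldl (fun acc f => min acc (g f)) (min a b)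
      = min a (r.foldl (fun acc f => min acc (g f)) b) := by
  induction r generalizing b with
  | nil => rfl
  | cons x t ih =>
      simp only [List.foldl_cons, min_assoc]
      exact ih (min b (g x))

lemma chain_min (x0 x1 x2 x3 x4 x5 x6 y0 y1 y2 y3 y4 y5 y6 : Bool) :
    (if (x0 || y0) then 0 else if (x1 || y1) then 1 else if (x2 || y2) then 2
     else if (x3 || y3) then 3 else if (x4 || y4) then 4 else if (x5 || y5) then 5
     else if (x6 || y6) then 6 else 7)
    = min (if x0 then 0 else if x1 then 1 else if x2 then 2 else if x3 then 3
           else if x4 then 4 else if x5 then 5 else if x6 then 6 else 7)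
          (if y0 then 0 else if y1 then 1 else if y2 then 2 else if y3 then 3
           else if y4 then 4 else if y5 then 5 else if y6 then 6 else (7 : Nat)) := by
  revert x0 x1 x2 x3 x4 x5 x6 y0 y1 y2 y3 y4 y5 y6
  decide

lemma rank_fold_eq_idx (files : List String) :
    files.foldl (fun acc f => min acc (file_rank f)) 7 = pvIdx files := by
  induction files with
  | nil => rfl
  | cons f r ih =>
      simp only [List.foldl_cons]
      rw [min_comm 7 (file_rank f), foldl_min_shift, ih, file_rank_eq_chain]
      simp only [pvIdx, pvChain, List.any_cons]
      exact (chain_min _ _ _ _ _ _ _ _ _ _ _ _ _ _).symm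

lemma bucket_eq (files : List String) :
    pvNames.getD (files.foldl (fun acc f => min acc (file_rank f)) 7) ""
      = (if files.any (fun f => PySem.Str.isIn "archive" (PySem.Str.lower f) || PySem.Str.isIn "backup" (PySem.Str.lower f)) then "archive_duplicates"
         else if files.any (fun f => PySem.Str.isIn "plugin" (PySem.Str.lower f)) then "plugin_duplicates"
         else if files.any (fun f => PySem.Str.isIn "agent" (PySem.Str.lower f)) then "agent_duplicates"
         else if files.any (fun f => PySem.Str.isIn "tool" (PySem.Str.lower f)) then "tool_duplicates"
         else if files.any (fun f => PySem.Str.isIn "trainer" (PySem.Str.lower f) || PySem.Str.isIn "train" (PySem.Str.lower f)) then "trainer_duplicates"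
         else if files.any (fun f => PySem.Str.isIn "integration" (PySem.Str.lower f) || PySem.Str.isIn "telegram" (PySem.Str.lower f)) then "integration_duplicates"
         else if files.any (fun f => PySem.Str.isIn "core" (PySem.Str.lower f)) then "core_duplicates"
         else "other_duplicates") := by
  rw [rank_fold_eq_idx]
  simp only [pvIdx]
  split_ifs <;> rfl

-- ===== VERDICT (by name: the statement is the Claim_ definition above) =====
theorem categorize_duplicates_spec : Claim_equal_categorize_duplicates := by
  intro duplicates _
  unfold Spec_categorize_duplicates categorize_duplicates categorize_duplicates_alt
  have hfold :
      duplicates.foldl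
        (fun (cats : PySem.Dict String (PySem.Dict String (List String))) kv =>
          if kv.2.any (fun f => PySem.Str.isIn "archive" (PySem.Str.lower f) || PySem.Str.isIn "backup" (PySem.Str.lower f)) then
            cats.modify "archive_duplicates" PySem.Dict.empty (fun d => d.insert kv.1 kv.2)
          else if kv.2.any (fun f => PySem.Str.isIn "plugin" (PySem.Str.lower f)) then
            cats.modify "plugin_duplicates" PySem.Dict.empty (fun d => d.insert kv.1 kv.2)
          else if kv.2.any (fun f => PySem.Str.isIn "agent" (PySem.Str.lower f)) then
            cats.modify "agent_duplicates" PySem.Dict.empty (fun d => d.insert kv.1 kv.2)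
          else if kv.2.any (fun f => PySem.Str.isIn "tool" (PySem.Str.lower f)) then
            cats.modify "tool_duplicates" PySem.Dict.empty (fun d => d.insert kv.1 kv.2)
          else if kv.2.any (fun f => PySem.Str.isIn "trainer" (PySem.Str.lower f) || PySem.Str.isIn "train" (PySem.Str.lower f)) then
            cats.modify "trainer_duplicates" PySem.Dict.empty (fun d => d.insert kv.1 kv.2)
          else if kv.2.any (fun f => PySem.Str.isIn "integration" (PySem.Str.lower f) || PySem.Str.isIn "telegram" (PySem.Str.lower f)) then
            cats.modify "integration_duplicates" PySem.Dict.empty (fun d => d.insert kv.1 kv.2)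
          else if kv.2.any (fun f => PySem.Str.isIn "core" (PySem.Str.lower f)) then
            cats.modify "core_duplicates" PySem.Dict.empty (fun d => d.insert kv.1 kv.2)
          else
            cats.modify "other_duplicates" PySem.Dict.empty (fun d => d.insert kv.1 kv.2))
        (PySem.Dict.ofList
          [("archive_duplicates", PySem.Dict.empty), ("plugin_duplicates", PySem.Dict.empty),
           ("agent_duplicates", PySem.Dict.empty), ("tool_duplicates", PySem.Dict.empty),
           ("trainer_duplicates", PySem.Dict.empty), ("integration_duplicates", PySem.Dict.empty),
           ("core_duplicates", PySem.Dict.empty), ("other_duplicates", PySem.Dict.empty)])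
      = duplicates.foldl
        (fun (cats : PySem.Dict String (PySem.Dict String (List String))) kv =>
          cats.modify (pvNames.getD (kv.2.foldl (fun acc f => min acc (file_rank f)) 7) "")
            PySem.Dict.empty (fun d => d.insert kv.1 kv.2))
        (PySem.Dict.ofList (pvNames.map (fun name => (name, PySem.Dict.empty)))) := by
    have hinit : PySem.Dict.ofList (pvNames.map (fun name => (name, (PySem.Dict.empty : PySem.Dict String (List String)))))
        = PySem.Dict.ofList
          [("archive_duplicates", PySem.Dict.empty), ("plugin_duplicates", PySem.Dict.empty),
           ("agent_duplicates", PySem.Dict.empty), ("tool_duplicates", PySem.Dict.empty),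
           ("trainer_duplicates", PySem.Dict.empty), ("integration_duplicates", PySem.Dict.empty),
           ("core_duplicates", PySem.Dict.empty), ("other_duplicates", PySem.Dict.empty)] := by rfl
    rw [hinit]
    apply PySem.List.foldl_congr_mem
    intro cats kv _
    rw [bucket_eq]
    split_ifs <;> rfl
  rw [hfold]
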